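-- pv_equiv track=rewrite | github.com/ScarlettDuna/python-practice | Goblins.py | find_best_night
-- ===== SOURCE A (Python) =====
-- def find_best_night(availability_table):
--     best_night = 0
--     for day in availability_table:
--         if availability_table[day] > best_night:
--             best_night = availability_table[day]
--     night_week = [key for key, value in availability_table.items() if value == best_night]
--     # To make sure we only get a string with one day
--     game_night = night_week[0]
--     return game_night
-- ===== SOURCE B (Python) =====
-- def find_best_night(availability_table):
--     return max(availability_table, key=availability_table.get)
-- ===== Notes on version B (the rewrite author's own statement) =====
-- stated objective: idiomatic
-- what changed: Replaced A's two passes (a 0-floored max scan with per-key dict lookups, then a filter over items() plus night_week[0]) by the standard one-liner max(availability_table, key=availability_table.get); Pre_ excludes the empty table and all-negative tables, on which A raises IndexError, and duplicate-key lists, which are no Python dict.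
-- outside the precondition, e.g. on find_best_night({}): A raises IndexError, B raises ValueError; on find_best_night({'mon': -3, 'tue': -1}): A raises IndexError, B returns 'tue'
import Mathlib
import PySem

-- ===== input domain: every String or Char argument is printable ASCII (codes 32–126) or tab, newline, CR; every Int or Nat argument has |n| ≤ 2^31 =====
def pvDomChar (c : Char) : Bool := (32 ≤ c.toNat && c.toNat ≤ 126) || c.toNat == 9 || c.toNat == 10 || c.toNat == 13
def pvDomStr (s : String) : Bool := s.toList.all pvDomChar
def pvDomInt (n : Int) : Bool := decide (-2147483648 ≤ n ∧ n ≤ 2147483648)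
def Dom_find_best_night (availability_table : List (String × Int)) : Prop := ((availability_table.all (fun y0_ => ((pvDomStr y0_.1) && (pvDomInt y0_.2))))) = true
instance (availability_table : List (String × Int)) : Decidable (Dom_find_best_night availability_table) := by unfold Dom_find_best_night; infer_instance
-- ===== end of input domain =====

-- B replaces A's two passes (0-floored max scan + filter + night_week[0]) by the idiomatic
-- max(availability_table, key=availability_table.get); equal on Pre_, same O(n) cost.
-- ===== PORT A =====
-- A iterates over the dict's keys looking availability_table[day] up each time (lookup = first match
-- in the association list), then filters items() for value == best and takes night_week[0]
-- (IndexError on an empty filter result is outside Pre_; the port returns "" there).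
def find_best_night (availability_table : List (String × Int)) : String :=
  let best_night : Int := availability_table.foldl (fun b p =>
    let v : Int := ((availability_table.find? (fun q => q.1 == p.1)).map Prod.snd).getD 0
    if v > b then v else b) 0
  let night_week : List String :=
    (availability_table.filter (fun p => p.2 == best_night)).map Prod.fst
  (PySem.List.pyGet? night_week 0).getD ""

-- ===== PORT B =====
-- Python's builtin max(keys, key=get) ported step for step: fold over the keys keeping the first
-- key of maximal looked-up value (exact: Python max keeps the earlier element on ties).
-- max of an empty dict raises ValueError in Python — outside Pre_; the port returns "" there.
def find_best_night_alt (availability_table : List (String × Int)) : String :=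
  let get : String → Int := fun d =>
    ((availability_table.find? (fun q => q.1 == d)).map Prod.snd).getD 0
  match availability_table.map Prod.fst with
  | [] => ""
  | k :: ks => ks.foldl (fun b d => if get d > get b then d else b) k

-- ===== PRECONDITION & SPEC =====
-- Pre_ excludes (i) the empty table and tables whose values are all negative, on which Python A
-- raises IndexError (night_week is empty); and (ii) lists with duplicate keys, which do not
-- correspond to any Python dict (dict keys are unique).
def Pre_find_best_night (availability_table : List (String × Int)) : Prop :=
  (availability_table.map Prod.fst).Nodup ∧ ∃ p ∈ availability_table, (0 : Int) ≤ p.2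
instance (availability_table : List (String × Int)) : Decidable (Pre_find_best_night availability_table) := by unfold Pre_find_best_night; infer_instance
def pvWitness_find_best_night : (List (String × Int)) := [("mon", -2), ("tue", 5), ("wed", 5)]

def Spec_find_best_night (availability_table : List (String × Int)) (out : String) : Prop := out = find_best_night_alt availability_table
instance (availability_table : List (String × Int)) (out : String) : Decidable (Spec_find_best_night availability_table out) := by unfold Spec_find_best_night; infer_instance

-- ===== CLAIM (what is proved, stated in full; the proofs are below) =====
def Claim_equal_find_best_night : Prop := ∀ (availability_table : List (String × Int)), Dom_find_best_night availability_table → Pre_find_best_night availability_table → Spec_find_best_night availability_table (find_best_night availability_table)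

-- ===== LEMMAS AND PROOFS =====

-- A's running max ("max of the values, floored at the initial accumulator")
def pvM (l : List (String × Int)) (b : Int) : Int :=
  l.foldl (fun b p => if p.2 > b then p.2 else b) b

theorem pvM_cons (p : String × Int) (r : List (String × Int)) (b : Int) :
    pvM (p :: r) b = pvM r (if p.2 > b then p.2 else b) := rfl

theorem pvM_le (l : List (String × Int)) (b : Int) : b ≤ pvM l b := by
  induction l generalizing b with
  | nil => simp [pvM]
  | cons p r ih =>
    rw [pvM_cons]
    split
    · exact le_of_lt (lt_of_lt_of_le (by omega) (ih p.2))
    · exact ih b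

theorem pvM_ge_mem (l : List (String × Int)) (b : Int) (q : String × Int) (hq : q ∈ l) :
    q.2 ≤ pvM l b := by
  induction l generalizing b with
  | nil => cases hq
  | cons p r ih =>
    rw [pvM_cons]
    rcases List.mem_cons.mp hq with h | h
    · subst h
      exact le_trans (by split <;> omega) (pvM_le r _)
    · exact ih _ h

-- raising the initial accumulator only floors the result
theorem pvM_raise (l : List (String × Int)) (b b' : Int) (h : b ≤ b') :
    pvM l b' = max b' (pvM l b) := by
  induction l generalizing b b' with
  | nil => simp [pvM]; omega
  | cons p r ih =>
    rw [pvM_cons, pvM_cons]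
    have h' : (if p.2 > b then p.2 else b) ≤ (if p.2 > b' then p.2 else b') := by
      split <;> split <;> omega
    rw [ih _ _ h']
    have hle : p.2 ≤ pvM r (if p.2 > b then p.2 else b) :=
      le_trans (by split <;> omega) (pvM_le r _)
    split <;> omega

-- first-argmax fold over the pairs (its value is the running max, and it is the first achiever)
def pvA (r : List (String × Int)) (p : String × Int) : String × Int :=
  r.foldl (fun b q => if q.2 > b.2 then q else b) p

-- the first-argmax fold is the head of A's filter at the running max
theorem pvA_filter (r : List (String × Int)) (p : String × Int) :
    ((p :: r).filter (fun x => x.2 == pvM r p.2)).head? = some (pvA r p) := by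
  induction r generalizing p with
  | nil => simp [pvA, pvM]
  | cons q r ih =>
    rw [pvM_cons]
    by_cases hq : q.2 > p.2
    · have hstep : pvA (q :: r) p = pvA r q := by
        simp [pvA, List.foldl_cons, hq]
      rw [hstep]
      simp only [if_pos hq]
      have hne : p.2 ≠ pvM r q.2 := by
        have := pvM_le r q.2; omega
      rw [List.filter_cons_of_neg (by simpa using hne)]
      exact ih q
    · have hstep : pvA (q :: r) p = pvA r p := by
        simp [pvA, List.foldl_cons, hq]
      rw [hstep]
      simp only [if_neg hq]
      by_cases hp : p.2 = pvM r p.2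
      · rw [List.filter_cons_of_pos (by simpa using hp)]
        have := ih p
        rw [List.filter_cons_of_pos (by simpa using hp)] at this
        simpa using this
      · have hqne : q.2 ≠ pvM r p.2 := by
          have h1 := pvM_le r p.2; omega
        rw [List.filter_cons_of_neg (by simpa using hp),
            List.filter_cons_of_neg (by simpa using hqne)]
        have := ih p
        rw [List.filter_cons_of_neg (by simpa using hp)] at this
        exact this

-- with nodup keys, the first-match lookup of a member's key is its own value
theorem pv_lookup_self (t : List (String × Int)) (hnd : (t.map Prod.fst).Nodup)
    (p : String × Int) (hp : p ∈ t) :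
    ((t.find? (fun q => q.1 == p.1)).map Prod.snd).getD 0 = p.2 := by
  induction t with
  | nil => cases hp
  | cons q r ih =>
    simp only [List.map_cons, List.nodup_cons] at hnd
    rcases List.mem_cons.mp hp with h | h
    · subst h
      simp
    · by_cases hqp : q.1 = p.1
      · exact absurd (hqp ▸ List.mem_map_of_mem h) hnd.1
      · rw [List.find?_cons_of_neg (by simpa using hqp)]
        exact ih hnd.2 h

-- B's key fold equals the pair fold, when every key looked up belongs to the nodup table
theorem pvB_keys (t : List (String × Int)) (hnd : (t.map Prod.fst).Nodup)
    (r : List (String × Int)) (hr : ∀ q ∈ r, q ∈ t)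
    (a : String × Int) (ha : a ∈ t) :
    (r.map Prod.fst).foldl (fun b d =>
        if ((t.find? (fun q => q.1 == d)).map Prod.snd).getD 0 >
           ((t.find? (fun q => q.1 == b)).map Prod.snd).getD 0 then d else b) a.1
      = (pvA r a).1 := by
  induction r generalizing a with
  | nil => simp [pvA]
  | cons q r ih =>
    simp only [List.map_cons, List.foldl_cons]
    rw [pv_lookup_self t hnd q (hr q List.mem_cons_self),
        pv_lookup_self t hnd a ha]
    have hmem : ∀ x ∈ r, x ∈ t := fun x hx => hr x (List.mem_cons_of_mem _ hx)
    have hstep : pvA (q :: r) a = pvA r (if q.2 > a.2 then q else a) := by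
      simp only [pvA, List.foldl_cons]
    rw [hstep]
    by_cases h : q.2 > a.2
    · simp only [if_pos h]
      exact ih hmem q (hr q List.mem_cons_self)
    · simp only [if_neg h]
      exact ih hmem a ha

theorem pyGet?_zero (l : List String) : PySem.List.pyGet? l 0 = l.head? := by
  cases l <;> simp [PySem.List.pyGet?, PySem.List.pyIdx?]

-- ===== VERDICT (by name: the statement is the Claim_ definition above) =====
theorem find_best_night_spec : Claim_equal_find_best_night := by
  intro t _ hpre
  obtain ⟨hnd, hex⟩ := hpre
  show find_best_night t = find_best_night_alt t
  obtain ⟨q0, hq0, hq0v⟩ := hex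
  cases ht : t with
  | nil => rw [ht] at hq0; cases hq0
  | cons p r =>
    subst ht
    -- A's floored max equals the unfloored running max of the pairs
    have hM0 : pvM (p :: r) 0 = pvM r p.2 := by
      rw [pvM_cons]
      by_cases hp : p.2 > (0 : Int)
      · rw [if_pos hp]
      · rw [if_neg hp, pvM_raise r p.2 0 (by omega)]
        have hub : q0.2 ≤ pvM r p.2 := by
          rcases List.mem_cons.mp hq0 with h | h
          · subst h; exact pvM_le r _
          · exact pvM_ge_mem r p.2 q0 h
        omega
    -- A's side
    have hA : find_best_night (p :: r) =
        ((((p :: r).filter (fun x => x.2 == pvM r p.2)).map Prod.fst).head?).getD "" := by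
      unfold find_best_night
      have hfold : (p :: r).foldl (fun b x =>
          let v : Int := (((p :: r).find? (fun q => q.1 == x.1)).map Prod.snd).getD 0
          if v > b then v else b) 0 = pvM (p :: r) 0 := by
        apply PySem.List.foldl_congr_mem
        intro acc x hx
        simp only [pv_lookup_self (p :: r) hnd x hx]
      simp only [hfold, hM0, pyGet?_zero]
    -- B's side
    have hB : find_best_night_alt (p :: r) = (pvA r p).1 := by
      unfold find_best_night_alt
      simp only [List.map_cons]
      exact pvB_keys (p :: r) hnd r (fun q hq => List.mem_cons_of_mem _ hq)
        p List.mem_cons_self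
    rw [hA, hB, List.head?_map, pvA_filter r p]
    simp
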